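-- pv_equiv track=rewrite | github.com/Haiqian-MA/CTA-HF-group | HFT.py | calc_change_ask
-- ===== SOURCE A (Python) =====
-- def calc_change_ask(ask_1, ask_size_1, ask_2, ask_size_2, tick_size=2):
--     if ask_1 == ask_2:  ## no change in shape
--         return ask_size_2[0] - ask_size_1[0]
--     ans = 0
--     if ask_1 > ask_2:
--         for i in range(5):
--             if ask_1 - i * tick_size > ask_2:
--                 ans += ask_size_2[i]
--             if ask_1 - i * tick_size == ask_2:
--                 ans += max(ask_size_2[i] - ask_size_1[0], 0)
--         return ans
--
--     if ask_1 < ask_2: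
--         for j in range(5):
--             if ask_1 + j * tick_size < ask_2:
--                 ans -= ask_size_1[j]
--             if ask_1 + j * tick_size == ask_2:
--                 ans -= max(ask_size_1[0] - ask_size_2[j], 0)
--         return ans
-- ===== SOURCE B (Python) =====
-- def _gap_levels(gap, tick_size):
--     # number of book levels strictly inside the positive price gap (capped at 5),
--     # and the index of the exactly-aligned old-best level, if any
--     if tick_size <= 0:
--         return 5, None
--     q, r = divmod(gap, tick_size)
--     n = min(5, q if r == 0 else q + 1)
--     return n, (q if r == 0 and q < 5 else None)
--
-- def calc_change_ask(ask_1, ask_size_1, ask_2, ask_size_2, tick_size=2):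
--     if ask_1 == ask_2:
--         return ask_size_2[0] - ask_size_1[0]
--     if ask_1 > ask_2:
--         n, b = _gap_levels(ask_1 - ask_2, tick_size)
--         ans = sum(ask_size_2[:n])
--         if b is not None:
--             ans += max(ask_size_2[b] - ask_size_1[0], 0)
--         return ans
--     n, b = _gap_levels(ask_2 - ask_1, tick_size)
--     ans = sum(ask_size_1[:n])
--     if b is not None:
--         ans += max(ask_size_1[0] - ask_size_2[b], 0)
--     return -ans
-- ===== Notes on version B (the rewrite author's own statement) =====
-- stated objective: simpler
-- what changed: B replaces A's scan over the five price levels (two guarded conditions per iteration) by computing the tick gap once with divmod: the gap count selects a summed prefix of the book and the exact-multiple boundary index selects the single clamped adjustment term.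
import Mathlib
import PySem

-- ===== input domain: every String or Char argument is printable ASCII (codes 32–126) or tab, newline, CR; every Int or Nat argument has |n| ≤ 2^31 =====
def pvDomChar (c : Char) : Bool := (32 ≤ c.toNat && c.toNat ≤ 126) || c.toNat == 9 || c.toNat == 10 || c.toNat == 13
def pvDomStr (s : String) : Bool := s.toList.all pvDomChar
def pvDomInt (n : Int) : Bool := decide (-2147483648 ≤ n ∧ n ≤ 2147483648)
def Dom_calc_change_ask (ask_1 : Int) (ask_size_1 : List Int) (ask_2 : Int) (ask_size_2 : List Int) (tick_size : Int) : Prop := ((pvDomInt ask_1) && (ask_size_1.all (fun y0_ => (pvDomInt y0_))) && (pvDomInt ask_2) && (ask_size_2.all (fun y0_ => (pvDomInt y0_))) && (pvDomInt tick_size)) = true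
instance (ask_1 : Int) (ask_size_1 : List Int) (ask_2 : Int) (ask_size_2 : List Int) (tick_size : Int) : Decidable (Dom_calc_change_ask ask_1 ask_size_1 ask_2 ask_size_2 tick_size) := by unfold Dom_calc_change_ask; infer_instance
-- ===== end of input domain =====

-- B replaces A's scan of the five price levels by a direct computation of the tick
-- gap (divmod) that selects the summed prefix and the aligned boundary level (objective: simpler).

-- ===== PORT A =====
def calc_change_ask (ask_1 : Int) (ask_size_1 : List Int) (ask_2 : Int) (ask_size_2 : List Int) (tick_size : Int) : Int :=
  if ask_1 = ask_2 then
    PySem.List.pyGetD ask_size_2 0 0 - PySem.List.pyGetD ask_size_1 0 0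
  else if ask_1 > ask_2 then
    (PySem.List.pyRange 0 5 1).foldl (fun ans i =>
      let ans := if ask_1 - i * tick_size > ask_2 then ans + PySem.List.pyGetD ask_size_2 i 0 else ans
      if ask_1 - i * tick_size = ask_2 then ans + max (PySem.List.pyGetD ask_size_2 i 0 - PySem.List.pyGetD ask_size_1 0 0) 0 else ans) 0
  else
    (PySem.List.pyRange 0 5 1).foldl (fun ans j =>
      let ans := if ask_1 + j * tick_size < ask_2 then ans - PySem.List.pyGetD ask_size_1 j 0 else ans
      if ask_1 + j * tick_size = ask_2 then ans - max (PySem.List.pyGetD ask_size_1 0 0 - PySem.List.pyGetD ask_size_2 j 0) 0 else ans) 0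

-- ===== PORT B =====
-- helper: number of levels strictly inside the gap (capped at 5) and the aligned boundary index
def gapLevels (gap : Int) (tick_size : Int) : Int × Option Int :=
  if tick_size ≤ 0 then (5, none)
  else
    let q := PySem.Int.floordiv gap tick_size
    let r := PySem.Int.mod gap tick_size
    (min 5 (if r = 0 then q else q + 1), if r = 0 ∧ q < 5 then some q else none)

def calc_change_ask_alt (ask_1 : Int) (ask_size_1 : List Int) (ask_2 : Int) (ask_size_2 : List Int) (tick_size : Int) : Int :=
  if ask_1 = ask_2 then
    PySem.List.pyGetD ask_size_2 0 0 - PySem.List.pyGetD ask_size_1 0 0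
  else if ask_1 > ask_2 then
    let nb := gapLevels (ask_1 - ask_2) tick_size
    let ans := (PySem.List.slice ask_size_2 none (some nb.1)).sum
    match nb.2 with
    | some b => ans + max (PySem.List.pyGetD ask_size_2 b 0 - PySem.List.pyGetD ask_size_1 0 0) 0
    | none => ans
  else
    let nb := gapLevels (ask_2 - ask_1) tick_size
    let ans := (PySem.List.slice ask_size_1 none (some nb.1)).sum
    match nb.2 with
    | some b => -(ans + max (PySem.List.pyGetD ask_size_1 0 0 - PySem.List.pyGetD ask_size_2 b 0) 0)
    | none => -ans

-- ===== PRECONDITION & SPEC =====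
-- Pre_ excludes exactly the inputs where A raises IndexError: the levels A indexes must exist.
def Pre_calc_change_ask (ask_1 : Int) (ask_size_1 : List Int) (ask_2 : Int) (ask_size_2 : List Int) (tick_size : Int) : Prop :=
  if ask_1 = ask_2 then ask_size_1 ≠ [] ∧ ask_size_2 ≠ []
  else if ask_1 > ask_2 then
    if tick_size ≤ 0 then 5 ≤ ask_size_2.length
    else
      min 4 (PySem.Int.floordiv (ask_1 - ask_2) tick_size) < (ask_size_2.length : Int) ∧
      (PySem.Int.mod (ask_1 - ask_2) tick_size = 0 ∧ PySem.Int.floordiv (ask_1 - ask_2) tick_size < 5 → ask_size_1 ≠ [])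
  else
    if tick_size ≤ 0 then 5 ≤ ask_size_1.length
    else
      min 5 (if PySem.Int.mod (ask_2 - ask_1) tick_size = 0 then PySem.Int.floordiv (ask_2 - ask_1) tick_size else PySem.Int.floordiv (ask_2 - ask_1) tick_size + 1) ≤ (ask_size_1.length : Int) ∧
      (PySem.Int.mod (ask_2 - ask_1) tick_size = 0 ∧ PySem.Int.floordiv (ask_2 - ask_1) tick_size < 5 → PySem.Int.floordiv (ask_2 - ask_1) tick_size < (ask_size_2.length : Int))
instance (ask_1 : Int) (ask_size_1 : List Int) (ask_2 : Int) (ask_size_2 : List Int) (tick_size : Int) : Decidable (Pre_calc_change_ask ask_1 ask_size_1 ask_2 ask_size_2 tick_size) := by unfold Pre_calc_change_ask; infer_instance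

def pvWitness_calc_change_ask : Int × List Int × Int × List Int × Int := (10, [1], 8, [2, 3], 2)

def Spec_calc_change_ask (ask_1 : Int) (ask_size_1 : List Int) (ask_2 : Int) (ask_size_2 : List Int) (tick_size : Int) (out : Int) : Prop := out = calc_change_ask_alt ask_1 ask_size_1 ask_2 ask_size_2 tick_size
instance (ask_1 : Int) (ask_size_1 : List Int) (ask_2 : Int) (ask_size_2 : List Int) (tick_size : Int) (out : Int) : Decidable (Spec_calc_change_ask ask_1 ask_size_1 ask_2 ask_size_2 tick_size out) := by unfold Spec_calc_change_ask; infer_instance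

-- ===== CLAIM (what is proved, stated in full; the proofs are below) =====
def Claim_equal_calc_change_ask : Prop := ∀ (ask_1 : Int) (ask_size_1 : List Int) (ask_2 : Int) (ask_size_2 : List Int) (tick_size : Int), Dom_calc_change_ask ask_1 ask_size_1 ask_2 ask_size_2 tick_size → Pre_calc_change_ask ask_1 ask_size_1 ask_2 ask_size_2 tick_size → Spec_calc_change_ask ask_1 ask_size_1 ask_2 ask_size_2 tick_size (calc_change_ask ask_1 ask_size_1 ask_2 ask_size_2 tick_size)

-- ===== LEMMAS AND PROOFS =====

lemma pyRange5 : PySem.List.pyRange 0 5 1 = [0, 1, 2, 3, 4] := by decide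

lemma foldl_add_body (C D : Int → Prop) [DecidablePred C] [DecidablePred D] (f g : Int → Int)
    (l : List Int) (s : Int) :
    l.foldl (fun ans i => let a := if C i then ans + f i else ans; if D i then a + g i else a) s
      = s + (l.map (fun i => (if C i then f i else 0) + (if D i then g i else 0))).sum := by
  induction l generalizing s with
  | nil => simp
  | cons x xs ih => simp only [List.foldl_cons, List.map_cons, List.sum_cons, ih]; split_ifs <;> ring

lemma foldl_sub_body (C D : Int → Prop) [DecidablePred C] [DecidablePred D] (f g : Int → Int)
    (l : List Int) (s : Int) :
    l.foldl (fun ans i => let a := if C i then ans - f i else ans; if D i then a - g i else a) s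
      = s - (l.map (fun i => (if C i then f i else 0) + (if D i then g i else 0))).sum := by
  induction l generalizing s with
  | nil => simp
  | cons x xs ih => simp only [List.foldl_cons, List.map_cons, List.sum_cons, ih]; split_ifs <;> ring

lemma g0 (x0 : Int) (t : List Int) : PySem.List.pyGetD (x0 :: t) 0 0 = x0 := by
  simp [PySem.List.pyGetD, PySem.List.pyGet?, PySem.List.pyIdx?]
lemma g1 (x0 x1 : Int) (t : List Int) : PySem.List.pyGetD (x0 :: x1 :: t) 1 0 = x1 := by
  simp [PySem.List.pyGetD, PySem.List.pyGet?, PySem.List.pyIdx?]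
lemma g2 (x0 x1 x2 : Int) (t : List Int) : PySem.List.pyGetD (x0 :: x1 :: x2 :: t) 2 0 = x2 := by
  simp [PySem.List.pyGetD, PySem.List.pyGet?, PySem.List.pyIdx?]; split_ifs <;> simp_all; omega
lemma g3 (x0 x1 x2 x3 : Int) (t : List Int) : PySem.List.pyGetD (x0 :: x1 :: x2 :: x3 :: t) 3 0 = x3 := by
  simp [PySem.List.pyGetD, PySem.List.pyGet?, PySem.List.pyIdx?]; split_ifs <;> simp_all; omega
lemma g4 (x0 x1 x2 x3 x4 : Int) (t : List Int) : PySem.List.pyGetD (x0 :: x1 :: x2 :: x3 :: x4 :: t) 4 0 = x4 := by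
  simp [PySem.List.pyGetD, PySem.List.pyGet?, PySem.List.pyIdx?]; split_ifs <;> simp_all; omega

-- ===== VERDICT (by name: the statement is the Claim_ definition above) =====
set_option maxHeartbeats 1000000 in
theorem calc_change_ask_spec : Claim_equal_calc_change_ask := by
  intro a1 s1 a2 s2 ts _ hP
  unfold Spec_calc_change_ask
  unfold Pre_calc_change_ask at hP
  unfold calc_change_ask calc_change_ask_alt gapLevels
  rw [pyRange5]
  by_cases h1 : a1 = a2
  · simp only [if_pos h1]
  · simp only [if_neg h1] at hP ⊢
    by_cases h2 : a1 > a2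
    · simp only [if_pos h2] at hP ⊢
      by_cases hts : ts ≤ 0
      · simp only [if_pos hts] at hP ⊢
        have hlen := hP
        rcases s2 with _|⟨x0,_|⟨x1,_|⟨x2,_|⟨x3,_|⟨x4,t⟩⟩⟩⟩⟩
        all_goals first
        | (exfalso; simp only [List.length_cons, List.length_nil] at hlen; omega)
        | (rw [foldl_add_body];
                      simp only [List.map_cons, List.map_nil, List.sum_cons, List.sum_nil, g0, g1, g2, g3, g4];
                      (first | rw [if_pos (show a1 - 0 * ts > a2 by omega)] | rw [if_neg (show ¬(a1 - 0 * ts > a2) by omega)]);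
                      (first | rw [if_pos (show a1 - 0 * ts = a2 by omega)] | rw [if_neg (show ¬(a1 - 0 * ts = a2) by omega)]);
                      (first | rw [if_pos (show a1 - 1 * ts > a2 by omega)] | rw [if_neg (show ¬(a1 - 1 * ts > a2) by omega)]);
                      (first | rw [if_pos (show a1 - 1 * ts = a2 by omega)] | rw [if_neg (show ¬(a1 - 1 * ts = a2) by omega)]);
                      (first | rw [if_pos (show a1 - 2 * ts > a2 by omega)] | rw [if_neg (show ¬(a1 - 2 * ts > a2) by omega)]);
                      (first | rw [if_pos (show a1 - 2 * ts = a2 by omega)] | rw [if_neg (show ¬(a1 - 2 * ts = a2) by omega)]);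
                      (first | rw [if_pos (show a1 - 3 * ts > a2 by omega)] | rw [if_neg (show ¬(a1 - 3 * ts > a2) by omega)]);
                      (first | rw [if_pos (show a1 - 3 * ts = a2 by omega)] | rw [if_neg (show ¬(a1 - 3 * ts = a2) by omega)]);
                      (first | rw [if_pos (show a1 - 4 * ts > a2 by omega)] | rw [if_neg (show ¬(a1 - 4 * ts > a2) by omega)]);
                      (first | rw [if_pos (show a1 - 4 * ts = a2 by omega)] | rw [if_neg (show ¬(a1 - 4 * ts = a2) by omega)]);
                      simp [PySem.List.slice, PySem.List.clampIdx, g0, g1, g2, g3, g4];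
                      all_goals omega)
      · push_neg at hts
        simp only [if_neg (by omega : ¬ ts ≤ 0)] at hP ⊢
        have hqr : PySem.Int.floordiv (a1 - a2) ts * ts + PySem.Int.mod (a1 - a2) ts = a1 - a2 :=
          PySem.Int.floordiv_mul_add_mod _ _
        set q := PySem.Int.floordiv (a1 - a2) ts with hqdef
        set r := PySem.Int.mod (a1 - a2) ts with hrdef
        have hr0 : 0 ≤ r := by
          rw [hrdef, PySem.Int.mod_eq_emod_of_pos hts]; exact Int.emod_nonneg _ (by omega)
        have hrts : r < ts := by
          rw [hrdef, PySem.Int.mod_eq_emod_of_pos hts]; exact Int.emod_lt_of_pos _ hts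
        have hq0 : 0 ≤ q := by
          rw [hqdef, PySem.Int.floordiv_eq_ediv_of_pos hts]
          exact Int.ediv_nonneg (by omega) hts.le
        obtain ⟨hlen, hne⟩ := hP
        by_cases h5 : 5 ≤ q
        · have h5ts : 5 * ts ≤ q * ts := mul_le_mul_of_nonneg_right h5 hts.le
          have hn : min 5 (if r = 0 then q else q + 1) = 5 := by split_ifs <;> omega
          rw [hn]
          have hb : ¬ (r = 0 ∧ q < 5) := by omega
          simp only [if_neg hb]
          have hmin : min 4 q = 4 := by omega
          rw [hmin] at hlen
          generalize hQ : q * ts = Q at hqr h5ts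
          rcases s2 with _|⟨x0,_|⟨x1,_|⟨x2,_|⟨x3,_|⟨x4,t⟩⟩⟩⟩⟩
          all_goals first
          | (exfalso; simp only [List.length_cons, List.length_nil] at hlen; omega)
          | (rw [foldl_add_body];
                      simp only [List.map_cons, List.map_nil, List.sum_cons, List.sum_nil, g0, g1, g2, g3, g4];
                      (first | rw [if_pos (show a1 - 0 * ts > a2 by omega)] | rw [if_neg (show ¬(a1 - 0 * ts > a2) by omega)]);
                      (first | rw [if_pos (show a1 - 0 * ts = a2 by omega)] | rw [if_neg (show ¬(a1 - 0 * ts = a2) by omega)]);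
                      (first | rw [if_pos (show a1 - 1 * ts > a2 by omega)] | rw [if_neg (show ¬(a1 - 1 * ts > a2) by omega)]);
                      (first | rw [if_pos (show a1 - 1 * ts = a2 by omega)] | rw [if_neg (show ¬(a1 - 1 * ts = a2) by omega)]);
                      (first | rw [if_pos (show a1 - 2 * ts > a2 by omega)] | rw [if_neg (show ¬(a1 - 2 * ts > a2) by omega)]);
                      (first | rw [if_pos (show a1 - 2 * ts = a2 by omega)] | rw [if_neg (show ¬(a1 - 2 * ts = a2) by omega)]);
                      (first | rw [if_pos (show a1 - 3 * ts > a2 by omega)] | rw [if_neg (show ¬(a1 - 3 * ts > a2) by omega)]);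
                      (first | rw [if_pos (show a1 - 3 * ts = a2 by omega)] | rw [if_neg (show ¬(a1 - 3 * ts = a2) by omega)]);
                      (first | rw [if_pos (show a1 - 4 * ts > a2 by omega)] | rw [if_neg (show ¬(a1 - 4 * ts > a2) by omega)]);
                      (first | rw [if_pos (show a1 - 4 * ts = a2 by omega)] | rw [if_neg (show ¬(a1 - 4 * ts = a2) by omega)]);
                      simp [PySem.List.slice, PySem.List.clampIdx, g0, g1, g2, g3, g4];
                      all_goals omega)
        · push_neg at h5
          have hmin : min 4 q = q := by omega
          rw [hmin] at hlen
          by_cases hr : r = 0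
          · have hs1 : s1 ≠ [] := hne ⟨hr, h5⟩
            rcases s1 with _|⟨y0,t1⟩
            · exact absurd rfl hs1
            have hn : min 5 (if r = 0 then q else q + 1) = q := by split_ifs <;> omega
            rw [hn]
            simp only [if_pos (⟨hr, h5⟩ : r = 0 ∧ q < 5)]
            interval_cases q <;> rcases s2 with _|⟨x0,_|⟨x1,_|⟨x2,_|⟨x3,_|⟨x4,t⟩⟩⟩⟩⟩
            all_goals first
            | (exfalso; simp only [List.length_cons, List.length_nil] at hlen; omega)
            | (rw [foldl_add_body];
                      simp only [List.map_cons, List.map_nil, List.sum_cons, List.sum_nil, g0, g1, g2, g3, g4];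
                      (first | rw [if_pos (show a1 - 0 * ts > a2 by omega)] | rw [if_neg (show ¬(a1 - 0 * ts > a2) by omega)]);
                      (first | rw [if_pos (show a1 - 0 * ts = a2 by omega)] | rw [if_neg (show ¬(a1 - 0 * ts = a2) by omega)]);
                      (first | rw [if_pos (show a1 - 1 * ts > a2 by omega)] | rw [if_neg (show ¬(a1 - 1 * ts > a2) by omega)]);
                      (first | rw [if_pos (show a1 - 1 * ts = a2 by omega)] | rw [if_neg (show ¬(a1 - 1 * ts = a2) by omega)]);
                      (first | rw [if_pos (show a1 - 2 * ts > a2 by omega)] | rw [if_neg (show ¬(a1 - 2 * ts > a2) by omega)]);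
                      (first | rw [if_pos (show a1 - 2 * ts = a2 by omega)] | rw [if_neg (show ¬(a1 - 2 * ts = a2) by omega)]);
                      (first | rw [if_pos (show a1 - 3 * ts > a2 by omega)] | rw [if_neg (show ¬(a1 - 3 * ts > a2) by omega)]);
                      (first | rw [if_pos (show a1 - 3 * ts = a2 by omega)] | rw [if_neg (show ¬(a1 - 3 * ts = a2) by omega)]);
                      (first | rw [if_pos (show a1 - 4 * ts > a2 by omega)] | rw [if_neg (show ¬(a1 - 4 * ts > a2) by omega)]);
                      (first | rw [if_pos (show a1 - 4 * ts = a2 by omega)] | rw [if_neg (show ¬(a1 - 4 * ts = a2) by omega)]);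
                      simp [PySem.List.slice, PySem.List.clampIdx, g0, g1, g2, g3, g4];
                      all_goals omega)
          · have hn : min 5 (if r = 0 then q else q + 1) = q + 1 := by split_ifs <;> omega
            rw [hn]
            have hb : ¬ (r = 0 ∧ q < 5) := by omega
            simp only [if_neg hb]
            interval_cases q <;> rcases s2 with _|⟨x0,_|⟨x1,_|⟨x2,_|⟨x3,_|⟨x4,t⟩⟩⟩⟩⟩
            all_goals first
            | (exfalso; simp only [List.length_cons, List.length_nil] at hlen; omega)
            | (rw [foldl_add_body];
                      simp only [List.map_cons, List.map_nil, List.sum_cons, List.sum_nil, g0, g1, g2, g3, g4];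
                      (first | rw [if_pos (show a1 - 0 * ts > a2 by omega)] | rw [if_neg (show ¬(a1 - 0 * ts > a2) by omega)]);
                      (first | rw [if_pos (show a1 - 0 * ts = a2 by omega)] | rw [if_neg (show ¬(a1 - 0 * ts = a2) by omega)]);
                      (first | rw [if_pos (show a1 - 1 * ts > a2 by omega)] | rw [if_neg (show ¬(a1 - 1 * ts > a2) by omega)]);
                      (first | rw [if_pos (show a1 - 1 * ts = a2 by omega)] | rw [if_neg (show ¬(a1 - 1 * ts = a2) by omega)]);
                      (first | rw [if_pos (show a1 - 2 * ts > a2 by omega)] | rw [if_neg (show ¬(a1 - 2 * ts > a2) by omega)]);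
                      (first | rw [if_pos (show a1 - 2 * ts = a2 by omega)] | rw [if_neg (show ¬(a1 - 2 * ts = a2) by omega)]);
                      (first | rw [if_pos (show a1 - 3 * ts > a2 by omega)] | rw [if_neg (show ¬(a1 - 3 * ts > a2) by omega)]);
                      (first | rw [if_pos (show a1 - 3 * ts = a2 by omega)] | rw [if_neg (show ¬(a1 - 3 * ts = a2) by omega)]);
                      (first | rw [if_pos (show a1 - 4 * ts > a2 by omega)] | rw [if_neg (show ¬(a1 - 4 * ts > a2) by omega)]);
                      (first | rw [if_pos (show a1 - 4 * ts = a2 by omega)] | rw [if_neg (show ¬(a1 - 4 * ts = a2) by omega)]);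
                      simp [PySem.List.slice, PySem.List.clampIdx, g0, g1, g2, g3, g4];
                      all_goals omega)
    · have h3 : a1 < a2 := by omega
      simp only [if_neg h2] at hP ⊢
      by_cases hts : ts ≤ 0
      · simp only [if_pos hts] at hP ⊢
        have hlen := hP
        rcases s1 with _|⟨x0,_|⟨x1,_|⟨x2,_|⟨x3,_|⟨x4,t⟩⟩⟩⟩⟩
        all_goals first
        | (exfalso; simp only [List.length_cons, List.length_nil] at hlen; omega)
        | (rw [foldl_sub_body];
                      simp only [List.map_cons, List.map_nil, List.sum_cons, List.sum_nil, g0, g1, g2, g3, g4];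
                      (first | rw [if_pos (show a1 + 0 * ts < a2 by omega)] | rw [if_neg (show ¬(a1 + 0 * ts < a2) by omega)]);
                      (first | rw [if_pos (show a1 + 0 * ts = a2 by omega)] | rw [if_neg (show ¬(a1 + 0 * ts = a2) by omega)]);
                      (first | rw [if_pos (show a1 + 1 * ts < a2 by omega)] | rw [if_neg (show ¬(a1 + 1 * ts < a2) by omega)]);
                      (first | rw [if_pos (show a1 + 1 * ts = a2 by omega)] | rw [if_neg (show ¬(a1 + 1 * ts = a2) by omega)]);
                      (first | rw [if_pos (show a1 + 2 * ts < a2 by omega)] | rw [if_neg (show ¬(a1 + 2 * ts < a2) by omega)]);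
                      (first | rw [if_pos (show a1 + 2 * ts = a2 by omega)] | rw [if_neg (show ¬(a1 + 2 * ts = a2) by omega)]);
                      (first | rw [if_pos (show a1 + 3 * ts < a2 by omega)] | rw [if_neg (show ¬(a1 + 3 * ts < a2) by omega)]);
                      (first | rw [if_pos (show a1 + 3 * ts = a2 by omega)] | rw [if_neg (show ¬(a1 + 3 * ts = a2) by omega)]);
                      (first | rw [if_pos (show a1 + 4 * ts < a2 by omega)] | rw [if_neg (show ¬(a1 + 4 * ts < a2) by omega)]);
                      (first | rw [if_pos (show a1 + 4 * ts = a2 by omega)] | rw [if_neg (show ¬(a1 + 4 * ts = a2) by omega)]);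
                      simp [PySem.List.slice, PySem.List.clampIdx, g0, g1, g2, g3, g4];
                      all_goals omega)
      · push_neg at hts
        simp only [if_neg (by omega : ¬ ts ≤ 0)] at hP ⊢
        have hqr : PySem.Int.floordiv (a2 - a1) ts * ts + PySem.Int.mod (a2 - a1) ts = a2 - a1 :=
          PySem.Int.floordiv_mul_add_mod _ _
        set q := PySem.Int.floordiv (a2 - a1) ts with hqdef
        set r := PySem.Int.mod (a2 - a1) ts with hrdef
        have hr0 : 0 ≤ r := by
          rw [hrdef, PySem.Int.mod_eq_emod_of_pos hts]; exact Int.emod_nonneg _ (by omega)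
        have hrts : r < ts := by
          rw [hrdef, PySem.Int.mod_eq_emod_of_pos hts]; exact Int.emod_lt_of_pos _ hts
        have hq0 : 0 ≤ q := by
          rw [hqdef, PySem.Int.floordiv_eq_ediv_of_pos hts]
          exact Int.ediv_nonneg (by omega) hts.le
        obtain ⟨hlen, hidx⟩ := hP
        by_cases h5 : 5 ≤ q
        · have h5ts : 5 * ts ≤ q * ts := mul_le_mul_of_nonneg_right h5 hts.le
          have hn : min 5 (if r = 0 then q else q + 1) = 5 := by split_ifs <;> omega
          rw [hn] at hlen ⊢
          have hb : ¬ (r = 0 ∧ q < 5) := by omega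
          simp only [if_neg hb]
          generalize hQ : q * ts = Q at hqr h5ts
          rcases s1 with _|⟨x0,_|⟨x1,_|⟨x2,_|⟨x3,_|⟨x4,t⟩⟩⟩⟩⟩
          all_goals first
          | (exfalso; simp only [List.length_cons, List.length_nil] at hlen; omega)
          | (rw [foldl_sub_body];
                      simp only [List.map_cons, List.map_nil, List.sum_cons, List.sum_nil, g0, g1, g2, g3, g4];
                      (first | rw [if_pos (show a1 + 0 * ts < a2 by omega)] | rw [if_neg (show ¬(a1 + 0 * ts < a2) by omega)]);
                      (first | rw [if_pos (show a1 + 0 * ts = a2 by omega)] | rw [if_neg (show ¬(a1 + 0 * ts = a2) by omega)]);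
                      (first | rw [if_pos (show a1 + 1 * ts < a2 by omega)] | rw [if_neg (show ¬(a1 + 1 * ts < a2) by omega)]);
                      (first | rw [if_pos (show a1 + 1 * ts = a2 by omega)] | rw [if_neg (show ¬(a1 + 1 * ts = a2) by omega)]);
                      (first | rw [if_pos (show a1 + 2 * ts < a2 by omega)] | rw [if_neg (show ¬(a1 + 2 * ts < a2) by omega)]);
                      (first | rw [if_pos (show a1 + 2 * ts = a2 by omega)] | rw [if_neg (show ¬(a1 + 2 * ts = a2) by omega)]);
                      (first | rw [if_pos (show a1 + 3 * ts < a2 by omega)] | rw [if_neg (show ¬(a1 + 3 * ts < a2) by omega)]);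
                      (first | rw [if_pos (show a1 + 3 * ts = a2 by omega)] | rw [if_neg (show ¬(a1 + 3 * ts = a2) by omega)]);
                      (first | rw [if_pos (show a1 + 4 * ts < a2 by omega)] | rw [if_neg (show ¬(a1 + 4 * ts < a2) by omega)]);
                      (first | rw [if_pos (show a1 + 4 * ts = a2 by omega)] | rw [if_neg (show ¬(a1 + 4 * ts = a2) by omega)]);
                      simp [PySem.List.slice, PySem.List.clampIdx, g0, g1, g2, g3, g4];
                      all_goals omega)
        · push_neg at h5
          by_cases hr : r = 0
          · have hidx' : q < (s2.length : Int) := hidx ⟨hr, h5⟩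
            have hn : min 5 (if r = 0 then q else q + 1) = q := by split_ifs <;> omega
            rw [hn] at hlen ⊢
            simp only [if_pos (⟨hr, h5⟩ : r = 0 ∧ q < 5)]
            interval_cases q <;> rcases s2 with _|⟨y0,_|⟨y1,_|⟨y2,_|⟨y3,_|⟨y4,t2⟩⟩⟩⟩⟩ <;>
              rcases s1 with _|⟨x0,_|⟨x1,_|⟨x2,_|⟨x3,_|⟨x4,t⟩⟩⟩⟩⟩
            all_goals first
            | (exfalso; simp only [List.length_cons, List.length_nil] at hlen; omega)
            | (exfalso; simp only [List.length_cons, List.length_nil] at hidx'; omega)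
            | (rw [foldl_sub_body];
                      simp only [List.map_cons, List.map_nil, List.sum_cons, List.sum_nil, g0, g1, g2, g3, g4];
                      (first | rw [if_pos (show a1 + 0 * ts < a2 by omega)] | rw [if_neg (show ¬(a1 + 0 * ts < a2) by omega)]);
                      (first | rw [if_pos (show a1 + 0 * ts = a2 by omega)] | rw [if_neg (show ¬(a1 + 0 * ts = a2) by omega)]);
                      (first | rw [if_pos (show a1 + 1 * ts < a2 by omega)] | rw [if_neg (show ¬(a1 + 1 * ts < a2) by omega)]);
                      (first | rw [if_pos (show a1 + 1 * ts = a2 by omega)] | rw [if_neg (show ¬(a1 + 1 * ts = a2) by omega)]);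
                      (first | rw [if_pos (show a1 + 2 * ts < a2 by omega)] | rw [if_neg (show ¬(a1 + 2 * ts < a2) by omega)]);
                      (first | rw [if_pos (show a1 + 2 * ts = a2 by omega)] | rw [if_neg (show ¬(a1 + 2 * ts = a2) by omega)]);
                      (first | rw [if_pos (show a1 + 3 * ts < a2 by omega)] | rw [if_neg (show ¬(a1 + 3 * ts < a2) by omega)]);
                      (first | rw [if_pos (show a1 + 3 * ts = a2 by omega)] | rw [if_neg (show ¬(a1 + 3 * ts = a2) by omega)]);
                      (first | rw [if_pos (show a1 + 4 * ts < a2 by omega)] | rw [if_neg (show ¬(a1 + 4 * ts < a2) by omega)]);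
                      (first | rw [if_pos (show a1 + 4 * ts = a2 by omega)] | rw [if_neg (show ¬(a1 + 4 * ts = a2) by omega)]);
                      simp [PySem.List.slice, PySem.List.clampIdx, g0, g1, g2, g3, g4];
                      all_goals omega)
          · have hn : min 5 (if r = 0 then q else q + 1) = q + 1 := by split_ifs <;> omega
            rw [hn] at hlen ⊢
            have hb : ¬ (r = 0 ∧ q < 5) := by omega
            simp only [if_neg hb]
            interval_cases q <;> rcases s1 with _|⟨x0,_|⟨x1,_|⟨x2,_|⟨x3,_|⟨x4,t⟩⟩⟩⟩⟩
            all_goals first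
            | (exfalso; simp only [List.length_cons, List.length_nil] at hlen; omega)
            | (rw [foldl_sub_body];
                      simp only [List.map_cons, List.map_nil, List.sum_cons, List.sum_nil, g0, g1, g2, g3, g4];
                      (first | rw [if_pos (show a1 + 0 * ts < a2 by omega)] | rw [if_neg (show ¬(a1 + 0 * ts < a2) by omega)]);
                      (first | rw [if_pos (show a1 + 0 * ts = a2 by omega)] | rw [if_neg (show ¬(a1 + 0 * ts = a2) by omega)]);
                      (first | rw [if_pos (show a1 + 1 * ts < a2 by omega)] | rw [if_neg (show ¬(a1 + 1 * ts < a2) by omega)]);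
                      (first | rw [if_pos (show a1 + 1 * ts = a2 by omega)] | rw [if_neg (show ¬(a1 + 1 * ts = a2) by omega)]);
                      (first | rw [if_pos (show a1 + 2 * ts < a2 by omega)] | rw [if_neg (show ¬(a1 + 2 * ts < a2) by omega)]);
                      (first | rw [if_pos (show a1 + 2 * ts = a2 by omega)] | rw [if_neg (show ¬(a1 + 2 * ts = a2) by omega)]);
                      (first | rw [if_pos (show a1 + 3 * ts < a2 by omega)] | rw [if_neg (show ¬(a1 + 3 * ts < a2) by omega)]);
                      (first | rw [if_pos (show a1 + 3 * ts = a2 by omega)] | rw [if_neg (show ¬(a1 + 3 * ts = a2) by omega)]);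
                      (first | rw [if_pos (show a1 + 4 * ts < a2 by omega)] | rw [if_neg (show ¬(a1 + 4 * ts < a2) by omega)]);
                      (first | rw [if_pos (show a1 + 4 * ts = a2 by omega)] | rw [if_neg (show ¬(a1 + 4 * ts = a2) by omega)]);
                      simp [PySem.List.slice, PySem.List.clampIdx, g0, g1, g2, g3, g4];
                      all_goals omega)
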